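-- pv_equiv track=rewrite | github.com/PatzD/python_lasoft_PatrykD_homework | statements_syntax/main.py | task_26
-- ===== SOURCE A (Python) =====
-- def task_26(og_array):
--     """
--     check if there is a 2 in the array and a 3 later somwhere
--     """
--     two = False
--     three = False
--     for element in og_array:
--         if element == 2:
--             two = True
--         if element == 3 and not two:
--             three = True
--     return two and three
-- ===== SOURCE B (Python) =====
-- def task_26(og_array):
--     """
--     check if there is a 2 in the array and a 3 later somwhere
--     """
--     arr = list(og_array)
--     if 2 not in arr:
--         return False
--     i = arr.index(2)
--     return 3 in arr[:i]
-- ===== Notes on version B (the rewrite author's own statement) =====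
-- stated objective: simpler
-- what changed: Replaces the two-flag running scan with a locate-then-check decomposition: find the first 2 via index() and test membership of 3 in the prefix before it.
import Mathlib
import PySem

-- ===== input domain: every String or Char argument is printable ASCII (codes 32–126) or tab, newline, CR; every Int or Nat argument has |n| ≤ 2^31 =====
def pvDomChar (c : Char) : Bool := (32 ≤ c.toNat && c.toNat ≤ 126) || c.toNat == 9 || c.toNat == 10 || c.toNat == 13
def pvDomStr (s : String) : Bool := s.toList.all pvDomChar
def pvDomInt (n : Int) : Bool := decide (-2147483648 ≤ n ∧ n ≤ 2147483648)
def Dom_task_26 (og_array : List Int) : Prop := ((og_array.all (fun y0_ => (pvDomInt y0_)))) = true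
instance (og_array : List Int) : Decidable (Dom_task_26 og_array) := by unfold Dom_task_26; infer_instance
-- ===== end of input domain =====

-- B replaces A's two-flag running scan by locating the first 2 and checking the prefix before it (simpler decomposition, same cost).

-- ===== PORT A =====
-- literal port of A's loop: two/three flags updated element by element
def task_26 (og_array : List Int) : Bool :=
  let st := og_array.foldl
    (fun (p : Bool × Bool) element =>
      let two := if element == 2 then true else p.1
      let three := if element == 3 && !two then true else p.2
      (two, three))
    (false, false)
  st.1 && st.2

-- ===== PORT B =====
-- literal port of Source B: '2 not in arr' → contains, arr.index(2) → PySem.List.index?, 'arr[:i]' → PySem.List.slice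
def task_26_alt (og_array : List Int) : Bool :=
  if og_array.contains 2 = false then false
  else
    match PySem.List.index? og_array 2 with
    | none => false
    | some i => (PySem.List.slice og_array none (some (i : Int))).contains 3

-- ===== PRECONDITION & SPEC =====
def Spec_task_26 (og_array : List Int) (out : Bool) : Prop := out = task_26_alt og_array
instance (og_array : List Int) (out : Bool) : Decidable (Spec_task_26 og_array out) := by unfold Spec_task_26; infer_instance

-- ===== CLAIM (what is proved, stated in full; the proofs are below) =====
def Claim_equal_task_26 : Prop := ∀ (og_array : List Int), Dom_task_26 og_array → Spec_task_26 og_array (task_26 og_array)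

-- ===== LEMMAS AND PROOFS =====

def pvStep (p : Bool × Bool) (element : Int) : Bool × Bool :=
  let two := if element == 2 then true else p.1
  let three := if element == 3 && !two then true else p.2
  (two, three)

-- once two is true the state is frozen
theorem pvFrozen (l : List Int) (t : Bool) : l.foldl pvStep (true, t) = (true, t) := by
  induction l with
  | nil => rfl
  | cons x l ih => simp [pvStep, List.foldl_cons, ih]

-- the first component ends up true iff 2 occurs in l
theorem pvTwo (l : List Int) : ∀ t : Bool, (l.foldl pvStep (false, t)).1 = l.contains 2 := by
  induction l with
  | nil => intro t; simp
  | cons x l ih =>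
    intro t
    rw [List.foldl_cons]
    by_cases hx : x = 2
    · subst hx
      have hs : pvStep (false, t) 2 = (true, t) := by simp [pvStep]
      rw [hs, pvFrozen]
      simp
    · have hs : pvStep (false, t) x = (false, if x == 3 && true then true else t) := by
        simp [pvStep, hx]
      have hne : (2 : Int) ≠ x := fun h => hx h.symm
      rw [hs, ih]
      simp [hne]

-- once three is true it stays true
theorem pvThree (l : List Int) : ∀ tw : Bool, (l.foldl pvStep (tw, true)).2 = true := by
  induction l with
  | nil => intro tw; rfl
  | cons x l ih =>
    intro tw
    simp only [List.foldl_cons, pvStep]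
    by_cases hx : x = 2 <;> by_cases h3 : x = 3 <;>
      simp [hx, h3, ih, pvFrozen]

theorem pvMain (l : List Int) : task_26 l = task_26_alt l := by
  induction l with
  | nil => rfl
  | cons x l ih =>
    have h1 : task_26 (x :: l) =
        ((l.foldl pvStep (pvStep (false, false) x)).1 &&
         (l.foldl pvStep (pvStep (false, false) x)).2) := rfl
    have ih' : ((l.foldl pvStep (false, false)).1 && (l.foldl pvStep (false, false)).2)
        = task_26_alt l := ih
    rw [h1]
    by_cases hx : x = 2
    · subst hx
      have hs : pvStep (false, false) (2 : Int) = (true, false) := by decide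
      rw [hs, pvFrozen]
      simp only [Bool.true_and]
      unfold task_26_alt
      rw [PySem.List.index?_cons_self]
      simp [PySem.List.slice]
    · by_cases h3 : x = 3
      · subst h3
        have hs : pvStep (false, false) (3 : Int) = (false, true) := by decide
        rw [hs]
        unfold task_26_alt
        rw [PySem.List.index?_cons_of_ne l (show (3 : Int) ≠ 2 by decide)]
        by_cases h2 : l.contains 2
        · have hm : (2 : Int) ∈ l := by simpa [List.contains_eq_mem] using h2
          obtain ⟨i, hi⟩ := Option.isSome_iff_exists.mp
            ((PySem.List.index?_isSome_iff l 2).mpr hm)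
          rw [hi]
          have hc : (3 :: l).contains 2 = true := by
            simp [List.contains_eq_mem, hm]
          simp only [pvTwo, pvThree, h2, hc, Option.map_some]
          rw [PySem.List.slice_to_natCast]
          simp
        · have hm : (2 : Int) ∉ l := by simpa [List.contains_eq_mem] using h2
          have hc : (3 :: l).contains 2 = false := by
            simp [List.contains_eq_mem, hm]
          simp [pvTwo, hm]
      · have hs : pvStep (false, false) x = (false, false) := by
          simp [pvStep, hx, h3]
        rw [hs, ih']
        have hne2 : (2 : Int) ≠ x := fun h => hx h.symm
        have hne3 : (3 : Int) ≠ x := fun h => h3 h.symm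
        unfold task_26_alt
        rw [PySem.List.index?_cons_of_ne l hx]
        have hc : (x :: l).contains 2 = l.contains 2 := by
          simp [hne2]
        rw [hc]
        by_cases h2 : l.contains 2
        · obtain ⟨i, hi⟩ := Option.isSome_iff_exists.mp
            ((PySem.List.index?_isSome_iff l 2).mpr (by simpa [List.contains_eq_mem] using h2))
          rw [hi]
          simp only [h2, Option.map_some]
          rw [PySem.List.slice_to_natCast, PySem.List.slice_to_natCast]
          simp [hne3]
        · have hm : (2 : Int) ∉ l := by simpa using h2
          simp [hm]

-- ===== VERDICT (by name: the statement is the Claim_ definition above) =====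
theorem task_26_spec : Claim_equal_task_26 := by
  intro l _
  unfold Spec_task_26
  exact pvMain l
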